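-- pv_equiv track=rewrite | github.com/hasamba/cyberlearn | fix_placeholder_prerequisites.py | is_placeholder_id
-- ===== SOURCE A (Python) =====
-- def is_placeholder_id(uuid_str):
--     """Check if UUID is a placeholder (has pattern like bt000000-0000-0000-0000-000000000001)"""
--     # Placeholder patterns: bt000000, fn000000, rt000000, etc.
--     placeholder_patterns = [
--         'bt000000-0000-0000-0000-',
--         'fn000000-0000-0000-0000-',
--         'rt000000-0000-0000-0000-',
--         'pt000000-0000-0000-0000-',
--         'ad000000-0000-0000-0000-',
--         'df000000-0000-0000-0000-',
--         'mw000000-0000-0000-0000-'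
--     ]
--     return any(uuid_str.startswith(pattern) for pattern in placeholder_patterns)
-- ===== SOURCE B (Python) =====
-- # Positional scan: length gate, then per-index template check (dash at positions 8,13,18,23,
-- # zero elsewhere in 2..23), then 2-char prefix set membership -- no loop over the 7 full patterns.
-- _PLACEHOLDER_PREFIXES = {'bt', 'fn', 'rt', 'pt', 'ad', 'df', 'mw'}
--
-- def is_placeholder_id(uuid_str):
--     """Check if UUID is a placeholder (has pattern like bt000000-0000-0000-0000-000000000001)"""
--     if len(uuid_str) < 24:
--         return False
--     for i in range(2, 24):
--         want = '-' if i in (8, 13, 18, 23) else '0'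
--         if uuid_str[i] != want:
--             return False
--     return uuid_str[:2] in _PLACEHOLDER_PREFIXES
-- ===== Notes on version B (the rewrite author's own statement) =====
-- stated objective: alternative
-- what changed: A's loop over 7 full 24-char pattern strings is replaced by a length gate plus a positional index scan (dash at positions 8,13,18,23, zero elsewhere in 2..23) followed by a 2-char prefix set membership; no pattern strings remain.
import Mathlib
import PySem

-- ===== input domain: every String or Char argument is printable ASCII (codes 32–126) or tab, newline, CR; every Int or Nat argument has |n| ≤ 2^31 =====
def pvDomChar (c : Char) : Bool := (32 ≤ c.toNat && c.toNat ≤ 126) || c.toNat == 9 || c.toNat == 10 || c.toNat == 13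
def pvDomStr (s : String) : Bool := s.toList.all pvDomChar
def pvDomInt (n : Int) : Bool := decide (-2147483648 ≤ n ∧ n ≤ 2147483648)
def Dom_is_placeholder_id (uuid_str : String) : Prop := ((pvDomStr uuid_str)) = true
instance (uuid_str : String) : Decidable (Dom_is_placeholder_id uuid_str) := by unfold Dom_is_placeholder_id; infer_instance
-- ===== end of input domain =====

-- B replaces A's loop over 7 full 24-char pattern strings by a length gate, a positional per-index
-- template scan over positions 2..23, and a 2-char prefix set membership (objective: alternative).

-- ===== PORT A =====
def is_placeholder_id (uuid_str : String) : Bool :=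
  -- any(uuid_str.startswith(pattern) for pattern in placeholder_patterns)
  (["bt000000-0000-0000-0000-",
    "fn000000-0000-0000-0000-",
    "rt000000-0000-0000-0000-",
    "pt000000-0000-0000-0000-",
    "ad000000-0000-0000-0000-",
    "df000000-0000-0000-0000-",
    "mw000000-0000-0000-0000-"] : List String).any
    (fun pattern => PySem.Str.startswith uuid_str pattern)

-- ===== PORT B =====
-- the early-returning 'for i in range(2, 24)' loop is ported as .all over the same range
-- (an early-exit all-checks loop computes exactly the conjunction); s[i] → Str.pyGet?
-- compared with 'some want' (every i in the range is in bounds once len ≥ 24, so no IndexError).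
def is_placeholder_id_alt (uuid_str : String) : Bool :=
  if PySem.Str.len uuid_str < 24 then false
  else if (PySem.List.pyRange 2 24 1).all (fun i =>
      PySem.Str.pyGet? uuid_str i ==
        some (if ([8, 13, 18, 23] : List Int).contains i then '-' else '0')) then
    (["bt", "fn", "rt", "pt", "ad", "df", "mw"] : List String).contains
      (PySem.Str.slice uuid_str none (some 2))
  else false

-- ===== PRECONDITION & SPEC =====
def Spec_is_placeholder_id (uuid_str : String) (out : Bool) : Prop := out = is_placeholder_id_alt uuid_str
instance (uuid_str : String) (out : Bool) : Decidable (Spec_is_placeholder_id uuid_str out) := by unfold Spec_is_placeholder_id; infer_instance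

-- ===== CLAIM (what is proved, stated in full; the proofs are below) =====
def Claim_equal_is_placeholder_id : Prop := ∀ (uuid_str : String), Dom_is_placeholder_id uuid_str → Spec_is_placeholder_id uuid_str (is_placeholder_id uuid_str)

-- ===== LEMMAS AND PROOFS =====

-- String.ofList [a,b] compared (as decide-equality, the shape List.contains leaves) with a 2-char literal.
theorem pv_d2 (p q a b : Char) (s : String) (hs : s.toList = [p, q]) :
    (decide (String.ofList [a, b] = s)) = (a == p && b == q) := by
  have h : (String.ofList [a, b] = s) ↔ ([a, b] = [p, q]) := by
    rw [← String.toList_inj, String.toList_ofList, hs]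
  simp [h, Bool.beq_eq_decide_eq]

-- A-side normal form: the any-over-7-patterns equals shared-suffix-prefix && 2-char-prefix membership.
theorem pv_key (l : List Char) :
    (["bt000000-0000-0000-0000-",
      "fn000000-0000-0000-0000-",
      "rt000000-0000-0000-0000-",
      "pt000000-0000-0000-0000-",
      "ad000000-0000-0000-0000-",
      "df000000-0000-0000-0000-",
      "mw000000-0000-0000-0000-"] : List String).any
      (fun pattern => pattern.toList.isPrefixOf l)
    =
    (("000000-0000-0000-0000-".toList.isPrefixOf (l.drop 2)) &&
     (["bt", "fn", "rt", "pt", "ad", "df", "mw"] : List String).contains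
       (String.ofList (l.take 2))) := by
  match l with
  | [] => decide
  | [a] => simp [List.isPrefixOf]
  | a :: b :: rest =>
      simp [List.isPrefixOf,
        pv_d2 'b' 't' a b "bt" rfl, pv_d2 'f' 'n' a b "fn" rfl,
        pv_d2 'r' 't' a b "rt" rfl, pv_d2 'p' 't' a b "pt" rfl,
        pv_d2 'a' 'd' a b "ad" rfl, pv_d2 'd' 'f' a b "df" rfl,
        pv_d2 'm' 'w' a b "mw" rfl, Bool.beq_comm]
      cases hP : ((['0','0','0','0','0','0','-','0','0','0','0','-','0','0','0','0','-','0','0','0','0','-'] : List Char).isPrefixOf rest) <;>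
        simp only [Bool.and_false, Bool.and_true, Bool.false_and, Bool.true_and, Bool.or_self]

-- unfold a literal prefix check one character at a time, as an indexed lookup
theorem pv_step (c : Char) (p rest : List Char) (k : Nat) :
    (c :: p).isPrefixOf (rest.drop k) = ((rest[k]? == some c) && p.isPrefixOf (rest.drop (k + 1))) := by
  cases h : rest.drop k with
  | nil =>
      have h0 : rest[k]? = none := by
        have e : (List.drop k rest)[0]? = rest[k]? := by simp [List.getElem?_drop]
        rw [← e, h]; rfl
      simp [List.isPrefixOf, h0]
  | cons a t =>
      have h0 : rest[k]? = some a := by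
        have e : (List.drop k rest)[0]? = rest[k]? := by simp [List.getElem?_drop]
        rw [← e, h]; rfl
      have h1 : rest.drop (k + 1) = t := by
        have h2 : rest.drop (k + 1) = (rest.drop k).drop 1 := by
          rw [List.drop_drop]
        simp [h2, h]
      have hsymm : (c == a) = (a == c) := by
        by_cases hca : c = a
        · simp [hca]
        · simp [hca, Ne.symm hca]
      simp [List.isPrefixOf, h0, h1, hsymm]

theorem pv_slice2 (s : String) : PySem.Str.slice s none (some 2) = String.ofList (s.toList.take 2) := by
  rw [← String.toList_inj, String.toList_ofList]
  simp [PySem.Str.toList_slice, PySem.List.slice_to]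

theorem pv_range : PySem.List.pyRange 2 24 1 =
    ([2,3,4,5,6,7,8,9,10,11,12,13,14,15,16,17,18,19,20,21,22,23] : List Int) := by decide

-- the shared 22-char suffix prefix-check equals the 22 positional lookups (both false when too short)
theorem pv_idx (s : String) :
    ("000000-0000-0000-0000-".toList.isPrefixOf (s.toList.drop 2))
    =
    (([2,3,4,5,6,7,8,9,10,11,12,13,14,15,16,17,18,19,20,21,22,23] : List Int).all (fun i =>
      PySem.Str.pyGet? s i ==
        some (if ([8, 13, 18, 23] : List Int).contains i then '-' else '0'))) := by
  simp [List.all_cons, List.all_nil, pv_step, PySem.List.pyGet?_of_nonneg]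

-- B-side normal form: B equals shared-suffix-prefix && 2-char-prefix membership.
theorem pv_B (s : String) : is_placeholder_id_alt s =
    (("000000-0000-0000-0000-".toList.isPrefixOf (s.toList.drop 2)) &&
     (["bt", "fn", "rt", "pt", "ad", "df", "mw"] : List String).contains
       (String.ofList (s.toList.take 2))) := by
  unfold is_placeholder_id_alt
  rw [pv_slice2, pv_range, ← pv_idx]
  by_cases hlen : s.toList.length < 24
  · have hpref : ("000000-0000-0000-0000-".toList.isPrefixOf (s.toList.drop 2)) = false := by
      rw [Bool.eq_false_iff]
      intro hp
      have h1 : ("000000-0000-0000-0000-".toList) <+: (s.toList.drop 2) :=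
        List.isPrefixOf_iff_prefix.mp hp
      have h2 := h1.length_le
      have h3 : ("000000-0000-0000-0000-".toList).length = 22 := by decide
      rw [h3, List.length_drop] at h2
      omega
    have hlen' : PySem.Str.len s < 24 := by
      simp only [PySem.Str.len_eq]; omega
    rw [if_pos hlen', hpref]
    simp
  · have hlen' : ¬ PySem.Str.len s < 24 := by
      simp only [PySem.Str.len_eq]; omega
    rw [if_neg hlen']
    cases hp : ("000000-0000-0000-0000-".toList.isPrefixOf (s.toList.drop 2)) <;> simp

-- ===== VERDICT (by name: the statement is the Claim_ definition above) =====
theorem is_placeholder_id_spec : Claim_equal_is_placeholder_id := by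
  intro s _
  unfold Spec_is_placeholder_id
  rw [pv_B]
  unfold is_placeholder_id
  simpa using pv_key s.toList
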